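-- pv_equiv track=rewrite | github.com/cwru-yash/ai-job-application-agent | src/applypilot/reporting.py | _runtime_mode
-- ===== SOURCE A (Python) =====
-- from typing import Any
--
-- def _runtime_mode(processes: list[dict[str, Any]]) -> str:
--     kinds = {row["kind"] for row in processes}
--     if "always_on_supervisor" in kinds:
--         return "always_on"
--     if "daily_supervisor" in kinds or "daily_controller" in kinds:
--         return "daily"
--     if "apply_cli" in kinds or "local_apply_agent" in kinds:
--         return "apply_only"
--     return "idle"
-- ===== SOURCE B (Python) =====
-- def _runtime_mode(processes):
--     RANK = {"always_on_supervisor": 3, "daily_supervisor": 2, "daily_controller": 2,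
--             "apply_cli": 1, "local_apply_agent": 1}
--     LABEL = {1: "apply_only", 2: "daily", 3: "always_on"}
--     best = 0
--     for row in processes:
--         best = max(best, RANK.get(row["kind"], 0))
--     return LABEL.get(best, "idle")
-- ===== Notes on version B (the rewrite author's own statement) =====
-- stated objective: alternative
-- what changed: Replaces the set-of-kinds plus priority-ordered membership-test chain by a single pass keeping the running maximum of a per-kind priority rank, mapped back to a label at the end.
import Mathlib
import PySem

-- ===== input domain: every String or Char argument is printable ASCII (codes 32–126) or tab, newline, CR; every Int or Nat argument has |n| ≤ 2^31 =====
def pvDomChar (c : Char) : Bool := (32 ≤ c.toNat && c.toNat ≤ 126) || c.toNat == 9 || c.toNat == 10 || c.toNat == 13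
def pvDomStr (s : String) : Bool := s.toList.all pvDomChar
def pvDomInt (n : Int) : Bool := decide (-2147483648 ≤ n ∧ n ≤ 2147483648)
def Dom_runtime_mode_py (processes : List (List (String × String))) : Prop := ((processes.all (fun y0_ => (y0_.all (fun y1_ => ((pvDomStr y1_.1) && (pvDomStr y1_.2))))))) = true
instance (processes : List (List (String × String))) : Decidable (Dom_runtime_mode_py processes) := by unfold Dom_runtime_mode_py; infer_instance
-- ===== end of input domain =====

-- ===== PORT A =====
-- header: B replaces A's set-of-kinds + ordered membership chain by a running maximum of
-- per-kind priority ranks (objective: alternative decomposition, same cost). Rows are dicts;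
-- row["kind"] raises KeyError in Python on a row without that key, which Pre_ excludes.

-- row["kind"] (total under Pre_; "" stands for the never-taken missing case)
def pvKindOf (row : List (String × String)) : String :=
  PySem.Dict.getD (PySem.Dict.mk row) "kind" ""

def runtime_mode_py (processes : List (List (String × String))) : String :=
  let kinds : PySem.Set String := PySem.Set.ofList (processes.map pvKindOf)
  if PySem.Set.contains kinds "always_on_supervisor" then "always_on"
  else if PySem.Set.contains kinds "daily_supervisor" || PySem.Set.contains kinds "daily_controller" then "daily"
  else if PySem.Set.contains kinds "apply_cli" || PySem.Set.contains kinds "local_apply_agent" then "apply_only"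
  else "idle"

-- ===== PORT B =====
def pvRANK : PySem.Dict String Int :=
  PySem.Dict.mk [("always_on_supervisor", 3), ("daily_supervisor", 2), ("daily_controller", 2),
                 ("apply_cli", 1), ("local_apply_agent", 1)]

def pvLABEL : PySem.Dict Int String :=
  PySem.Dict.mk [(1, "apply_only"), (2, "daily"), (3, "always_on")]

def runtime_mode_py_alt (processes : List (List (String × String))) : String :=
  let best : Int := processes.foldl
    (fun best row => max best (PySem.Dict.getD pvRANK (pvKindOf row) 0)) 0
  PySem.Dict.getD pvLABEL best "idle"

-- ===== PRECONDITION & SPEC =====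
-- Pre_ excludes exactly the inputs where Python's row["kind"] raises KeyError (a row without a "kind" key).
def Pre_runtime_mode_py (processes : List (List (String × String))) : Prop :=
  ∀ row ∈ processes, (PySem.Dict.mk row).contains "kind" = true
instance (processes : List (List (String × String))) : Decidable (Pre_runtime_mode_py processes) := by
  unfold Pre_runtime_mode_py; infer_instance

def pvWitness_runtime_mode_py : (List (List (String × String))) :=
  [[("kind", "daily_controller")], [("kind", "zombie")]]

def Spec_runtime_mode_py (processes : List (List (String × String))) (out : String) : Prop := out = runtime_mode_py_alt processes
instance (processes : List (List (String × String))) (out : String) : Decidable (Spec_runtime_mode_py processes out) := by unfold Spec_runtime_mode_py; infer_instance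

-- ===== CLAIM (what is proved, stated in full; the proofs are below) =====
def Claim_equal_runtime_mode_py : Prop := ∀ (processes : List (List (String × String))), Dom_runtime_mode_py processes → Pre_runtime_mode_py processes → Spec_runtime_mode_py processes (runtime_mode_py processes)

-- ===== LEMMAS AND PROOFS =====

-- the rank of one kind string, as B computes it
def pvR (k : String) : Int := PySem.Dict.getD pvRANK k 0

lemma pvR_cases (k : String) :
    pvR k = if k = "always_on_supervisor" then 3
      else if k = "daily_supervisor" then 2 else if k = "daily_controller" then 2
      else if k = "apply_cli" then 1 else if k = "local_apply_agent" then 1 else 0 := by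
  split_ifs with h1 h2 h3 h4 h5
  · subst h1; rfl
  · subst h2; rfl
  · subst h3; rfl
  · subst h4; rfl
  · subst h5; rfl
  · simp only [pvR, pvRANK, PySem.Dict.getD, PySem.Dict.get?_mk_cons, beq_iff_eq,
      if_neg (Ne.symm h1), if_neg (Ne.symm h2), if_neg (Ne.symm h3),
      if_neg (Ne.symm h4), if_neg (Ne.symm h5)]
    rfl

lemma pvR_le_three (k : String) : pvR k ≤ 3 := by
  rw [pvR_cases]; split_ifs <;> norm_num

-- the loop's running maximum, over the list of kind strings
def pvM (ks : List String) (a : Int) : Int := ks.foldl (fun b k => max b (pvR k)) a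

lemma pvM_le {ks : List String} {a n : Int} (ha : a ≤ n) (h : ∀ k ∈ ks, pvR k ≤ n) :
    pvM ks a ≤ n := by
  induction ks generalizing a with
  | nil => exact ha
  | cons k ks ih =>
    exact ih (max_le ha (h k (by simp))) (fun x hx => h x (by simp [hx]))

lemma le_pvM_iff (ks : List String) (a n : Int) :
    n ≤ pvM ks a ↔ n ≤ a ∨ ∃ k ∈ ks, n ≤ pvR k := by
  induction ks generalizing a with
  | nil => simp [pvM]
  | cons k ks ih =>
    simp only [pvM, List.foldl_cons] at *
    rw [ih]
    simp [or_assoc]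

lemma foldl_map_kind (processes : List (List (String × String))) :
    processes.foldl (fun best row => max best (PySem.Dict.getD pvRANK (pvKindOf row) 0)) 0
      = pvM (processes.map pvKindOf) 0 := by
  simp [pvM, List.foldl_map, pvR]

-- ===== VERDICT (by name: the statement is the Claim_ definition above) =====
theorem runtime_mode_py_spec : Claim_equal_runtime_mode_py := by
  intro processes _ _
  unfold Spec_runtime_mode_py runtime_mode_py runtime_mode_py_alt
  rw [foldl_map_kind]
  set ks := processes.map pvKindOf with hks
  by_cases h3 : "always_on_supervisor" ∈ ks
  · have hge : (3:Int) ≤ pvM ks 0 := by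
      rw [le_pvM_iff]; right; exact ⟨_, h3, by rw [pvR_cases]; simp⟩
    have hle : pvM ks 0 ≤ 3 := pvM_le (by norm_num) (fun k _ => pvR_le_three k)
    have hm : pvM ks 0 = 3 := le_antisymm hle hge
    rw [hm]
    simp [h3]
    rfl
  · by_cases h2 : "daily_supervisor" ∈ ks ∨ "daily_controller" ∈ ks
    · have hge : (2:Int) ≤ pvM ks 0 := by
        rw [le_pvM_iff]; right
        rcases h2 with h | h
        · exact ⟨_, h, by rw [pvR_cases]; simp⟩
        · exact ⟨_, h, by rw [pvR_cases]; simp⟩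
      have hle : pvM ks 0 ≤ 2 := by
        refine pvM_le (by norm_num) (fun k hk => ?_)
        rw [pvR_cases]
        split_ifs with e1 <;> try norm_num
        exact absurd (e1 ▸ hk) h3
      have hm : pvM ks 0 = 2 := le_antisymm hle hge
      rw [hm]
      rcases h2 with h | h <;>
        simp [h3, h] <;> rfl
    · push Not at h2
      by_cases h1 : "apply_cli" ∈ ks ∨ "local_apply_agent" ∈ ks
      · have hge : (1:Int) ≤ pvM ks 0 := by
          rw [le_pvM_iff]; right
          rcases h1 with h | h
          · exact ⟨_, h, by rw [pvR_cases]; simp⟩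
          · exact ⟨_, h, by rw [pvR_cases]; simp⟩
        have hle : pvM ks 0 ≤ 1 := by
          refine pvM_le (by norm_num) (fun k hk => ?_)
          rw [pvR_cases]
          split_ifs with e1 e2 e3 <;> try norm_num
          · exact absurd (e1 ▸ hk) h3
          · exact absurd (e2 ▸ hk) h2.1
          · exact absurd (e3 ▸ hk) h2.2
        have hm : pvM ks 0 = 1 := le_antisymm hle hge
        rw [hm]
        rcases h1 with h | h <;>
          simp [h3, h2.1, h2.2, h] <;> rfl
      · push Not at h1
        have hle : pvM ks 0 ≤ 0 := by
          refine pvM_le (by norm_num) (fun k hk => ?_)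
          rw [pvR_cases]
          split_ifs with e1 e2 e3 e4 e5 <;> try norm_num
          · exact absurd (e1 ▸ hk) h3
          · exact absurd (e2 ▸ hk) h2.1
          · exact absurd (e3 ▸ hk) h2.2
          · exact absurd (e4 ▸ hk) h1.1
          · exact absurd (e5 ▸ hk) h1.2
        have hge : (0:Int) ≤ pvM ks 0 := by rw [le_pvM_iff]; left; norm_num
        have hm : pvM ks 0 = 0 := le_antisymm hle hge
        rw [hm]
        simp [h3, h2.1, h2.2, h1.1, h1.2]
        rfl
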